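-- pv_equiv track=rewrite | github.com/refinery-labs/refinery | api/utils/block_libraries.py | split_library_version_string
-- ===== SOURCE A (Python) =====
-- def split_library_version_string(library):
--     # Just a normal library install -- grab the latest
--     if "@" not in str(library):
--         return library, "latest"
--
--     # If the library name is just an @ symbol
--     if len(str(library)) == 1:
--         return library, "latest"
--
--     # Split the library based on the @ symbol into 2 halves. Note: The 1 means that it'll be split once only.
--     library_version_tuple = str(library).split('@', 1)
--     name = library_version_tuple[0]
--     version = library_version_tuple[1]
--
--     # Some libraries start with an @ symbol in the Node ecosystem
--     # Like: @babel/node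
--     if len(name) == 0:
--         # Just in case there is a version specified for a Node ecosystem package
--         # @babel/node@1.0.0
--         second_name, second_version = split_library_version_string(version)
--
--         # If there wasn't an @ symbol in the second part, then the library string can be returned as-is
--         if version == second_version:
--             return library, "latest"
--
--         return '@' + second_name, second_version
--
--     return name, version
-- ===== SOURCE B (Python) =====
-- def split_library_version_string(library):
--     s = str(library)
--     i = 0
--     while i < len(s) and s[i] == '@':
--         i += 1
--     rest = s[i:]
--     if '@' not in rest:
--         return library, "latest"
--     name_part, version = rest.split('@', 1)
--     return s[:i] + name_part, version
-- ===== Notes on version B (the rewrite author's own statement) =====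
-- stated objective: simpler
-- what changed: A peels leading '@' characters by recursing on the part after the first '@' and re-prepending '@'; B counts the leading '@' run with one loop and does a single split of the remainder, no recursion.
import Mathlib
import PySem

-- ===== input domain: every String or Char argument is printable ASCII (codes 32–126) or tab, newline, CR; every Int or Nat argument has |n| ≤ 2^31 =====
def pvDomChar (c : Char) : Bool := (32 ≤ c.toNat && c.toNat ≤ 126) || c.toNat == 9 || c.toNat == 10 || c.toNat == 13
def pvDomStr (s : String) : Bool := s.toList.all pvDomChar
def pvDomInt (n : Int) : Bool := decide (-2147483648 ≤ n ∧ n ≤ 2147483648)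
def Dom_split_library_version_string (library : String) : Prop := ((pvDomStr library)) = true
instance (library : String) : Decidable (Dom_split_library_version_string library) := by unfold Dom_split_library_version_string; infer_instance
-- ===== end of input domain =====

-- B replaces A's recursive peeling of leading '@' characters by one counting loop and a single
-- split of the remainder (objective: simpler, non-recursive); return values are identical.

-- ===== PORT A =====
-- Helper lemmas needed by port A's termination argument (cited in decreasing_by):
-- exact characterisation of CPython's s.split('@', 1) when '@' occurs in s.
theorem pvGoZero (fuel : Nat) (l cur : List Char) (acc : List (List Char)) :
    PySem.Chars.splitOnMax.go ['@'] fuel 0 l cur acc = ((cur.reverse ++ l) :: acc).reverse := by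
  cases fuel with
  | zero => simp [PySem.Chars.splitOnMax.go]
  | succ f => cases l with
    | nil => simp [PySem.Chars.splitOnMax.go]
    | cons c r => simp [PySem.Chars.splitOnMax.go]

theorem pvGoOne (l : List Char) : ∀ (fuel : Nat), l.length < fuel → ∀ (cur : List Char) (acc : List (List Char)),
    PySem.Chars.splitOnMax.go ['@'] fuel 1 l cur acc =
      (if '@' ∈ l then (l.dropWhile (· ≠ '@')).tail :: (cur.reverse ++ l.takeWhile (· ≠ '@')) :: acc
       else (cur.reverse ++ l) :: acc).reverse := by
  induction l with
  | nil =>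
    intro fuel hf cur acc
    match fuel, hf with
    | f+1, _ => simp [PySem.Chars.splitOnMax.go]
  | cons c r ih =>
    intro fuel hf cur acc
    match fuel, hf with
    | f+1, hf =>
      by_cases hc : c = '@'
      · subst hc
        simp [PySem.Chars.splitOnMax.go, List.isPrefixOf, pvGoZero]
      · have hp : ['@'].isPrefixOf (c :: r) = false := by
          simp [List.isPrefixOf]; exact fun h => hc h.symm
        rw [show PySem.Chars.splitOnMax.go ['@'] (f+1) 1 (c :: r) cur acc =
              PySem.Chars.splitOnMax.go ['@'] f 1 r (c :: cur) acc by
            simp [PySem.Chars.splitOnMax.go, hp]]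
        rw [ih f (by simpa using Nat.lt_of_succ_lt_succ hf) (c :: cur) acc]
        have hc' : ¬ '@' = c := fun h => hc h.symm
        simp [hc, hc']

-- s.split('@', 1) = [part before the first '@', part after it]  (when '@' ∈ s)
theorem pvSplitAt (s : List Char) (h : '@' ∈ s) :
    PySem.Chars.splitOnMax s ['@'] 1 = [s.takeWhile (· ≠ '@'), (s.dropWhile (· ≠ '@')).tail] := by
  unfold PySem.Chars.splitOnMax
  norm_num
  rw [pvGoOne s (s.length + 1) (by omega) [] []]
  simp [h]

theorem pvIsInAt (s : List Char) : PySem.Chars.isIn ['@'] s = true ↔ '@' ∈ s :=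
  (PySem.Chars.isIn_iff_infix ['@'] s).trans (List.singleton_infix_iff '@' s)

theorem pvTailLt (l : List Char) (h : '@' ∈ l) :
    ((l.dropWhile (· ≠ '@')).tail).length < l.length := by
  have h1 : l.dropWhile (· ≠ '@') ≠ [] := by
    simp [List.dropWhile_eq_nil_iff]; exact h
  have h2 := List.length_dropWhile_le (p := (· ≠ '@')) (l := l)
  have h3 : (l.dropWhile (· ≠ '@')).tail.length = (l.dropWhile (· ≠ '@')).length - 1 := List.length_tail
  have h4 : 0 < (l.dropWhile (· ≠ '@')).length := List.length_pos_iff.mpr h1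
  omega

def pvLatest : List Char := ['l', 'a', 't', 'e', 's', 't']

-- the body of A on the character list of the string (str(library) = library here)
def pvAuxA (s : List Char) : List Char × List Char :=
  if h1 : ¬ PySem.Chars.isIn ['@'] s then (s, pvLatest)
  else if _h2 : s.length = 1 then (s, pvLatest)
  else
    let t := PySem.Chars.splitOnMax s ['@'] 1
    let name := t.getD 0 []
    let version := t.getD 1 []
    if name.length = 0 then
      let p := pvAuxA version
      if version = p.2 then (s, pvLatest)
      else ('@' :: p.1, p.2)
    else (name, version)
termination_by s.length
decreasing_by
  have hin : '@' ∈ s := (pvIsInAt s).mp (of_not_not h1)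
  simp only [pvSplitAt s hin, List.getD]
  simpa using pvTailLt s hin

def split_library_version_string (library : String) : String × String :=
  let p := pvAuxA library.toList
  (String.ofList p.1, String.ofList p.2)

-- ===== PORT B =====
-- while i < len(s) and s[i] == '@': i += 1   (count of leading '@')
def pvCountAt : List Char → Nat
  | [] => 0
  | c :: r => if c = '@' then pvCountAt r + 1 else 0

-- body of B on the character list; s[i:]/s[:i] with 0 ≤ i ≤ len(s) are exactly drop/take
def pvAuxB (s : List Char) : List Char × List Char :=
  let i := pvCountAt s
  let rest := s.drop i
  if ¬ PySem.Chars.isIn ['@'] rest then (s, pvLatest)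
  else
    let t := PySem.Chars.splitOnMax rest ['@'] 1
    (s.take i ++ t.getD 0 [], t.getD 1 [])

def split_library_version_string_alt (library : String) : String × String :=
  let p := pvAuxB library.toList
  (String.ofList p.1, String.ofList p.2)

-- ===== PRECONDITION & SPEC =====
def Spec_split_library_version_string (library : String) (out : String × String) : Prop := out = split_library_version_string_alt library
instance (library : String) (out : String × String) : Decidable (Spec_split_library_version_string library out) := by unfold Spec_split_library_version_string; infer_instance

-- ===== CLAIM (what is proved, stated in full; the proofs are below) =====
def Claim_equal_split_library_version_string : Prop := ∀ (library : String), Dom_split_library_version_string library → Spec_split_library_version_string library (split_library_version_string library)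

-- ===== LEMMAS AND PROOFS =====
theorem pvMainEq (s : List Char) : pvAuxA s = pvAuxB s := by
  by_cases hin : '@' ∈ s
  · have hIs : PySem.Chars.isIn ['@'] s = true := (pvIsInAt s).mpr hin
    by_cases hlen : s.length = 1
    · match s, hlen, hin with
      | [c], _, hin =>
        have hc : '@' = c := by simpa using hin
        subst hc
        rw [pvAuxA, pvAuxB]
        simp [pvCountAt]
        decide
    · match s, hin, hIs, hlen with
      | c :: r, hin, hIs, hlen =>
        by_cases hc : c = '@'
        · subst hc
          have hr : r ≠ [] := by intro h; subst h; exact hlen rfl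
          have ih := pvMainEq r
          have hsp := pvSplitAt ('@' :: r) hin
          rw [pvAuxA, pvAuxB]
          simp only [hIs, hsp, pvCountAt]
          norm_num
          rw [ih]
          by_cases hin2 : PySem.Chars.isIn ['@'] (List.drop (pvCountAt r) r) = true
          · have hm2 : '@' ∈ List.drop (pvCountAt r) r := (pvIsInAt _).mp hin2
            have hsp2 := pvSplitAt _ hm2
            have hlt : ((List.drop (pvCountAt r) r).dropWhile (· ≠ '@')).tail.length < r.length := by
              have := pvTailLt _ hm2
              have := List.length_drop (l := r) (i := pvCountAt r)
              omega
            have hne : r ≠ ((List.drop (pvCountAt r) r).dropWhile (· ≠ '@')).tail := by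
              intro h; rw [← h] at hlt; omega
            simp [pvAuxB, hin2, hsp2]
            rw [if_neg hr, if_neg (by simpa using hne)]
          · simp [pvAuxB, hin2]
        · -- name is nonempty: both split at the first '@', which is not at position 0
          have hsp := pvSplitAt (c :: r) hin
          rw [pvAuxA, pvAuxB]
          have hr : '@' ∈ r := by
            rcases List.mem_cons.mp hin with h | h
            · exact absurd h.symm hc
            · exact h
          simp only [hIs, hsp, pvCountAt, if_neg hc]
          simp [hIs, hsp, hc, List.ne_nil_of_mem hr]
  · -- no '@' anywhere: both return (s, "latest")
    have h1 : PySem.Chars.isIn ['@'] s = false :=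
      Bool.not_eq_true _ |>.mp (fun h => hin ((pvIsInAt s).mp h))
    have h2 : PySem.Chars.isIn ['@'] (s.drop (pvCountAt s)) = false := by
      refine Bool.not_eq_true _ |>.mp (fun h => hin ?_)
      exact List.mem_of_mem_drop ((pvIsInAt _).mp h)
    rw [pvAuxA, pvAuxB]
    simp [h1, h2]
termination_by s.length

-- ===== VERDICT (by name: the statement is the Claim_ definition above) =====
theorem split_library_version_string_spec : Claim_equal_split_library_version_string := by
  intro library _
  unfold Spec_split_library_version_string split_library_version_string split_library_version_string_alt
  rw [pvMainEq]
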